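-- pv_equiv track=rewrite | github.com/rossop/LeetCode | Python/Easy/2373_ largest_local_values_matrix.py | largestLocalAlt
-- ===== SOURCE A (Python) =====
-- from typing import List
--
-- def largestLocalAlt(grid: List[List[int]]) -> List[List[int]]:
--     """
--     An alternative approach to compute the largest local values in a grid.
--
--     This alternative solution iterates over the grid and directly compares the values
--     in the 3 x 3 submatrices, updating the result matrix in a more streamlined fashion.
--
--     Args:
--         grid (List[List[int]]): A 2D list representing an n x n matrix.
--
--     Returns:
--         List[List[int]]: A 2D list representing the largest local values in the grid.
--     """
--     n: int = len(grid)
--     result: List[List[int]] = []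
--
--     for i in range(n - 2):
--         row: List[int] = []
--         for j in range(n - 2):
--             max_val = max(grid[i][j], grid[i][j + 1], grid[i][j + 2],
--                           grid[i + 1][j], grid[i + 1][j + 1], grid[i + 1][j + 2],
--                           grid[i + 2][j], grid[i + 2][j + 1], grid[i + 2][j + 2])
--             row.append(max_val)
--         result.append(row)
--
--     return result
-- ===== SOURCE B (Python) =====
-- from typing import List
--
-- def largestLocalAlt(grid: List[List[int]]) -> List[List[int]]:
--     """Separable two-pass version: horizontal 3-window maxima per row, then
--     vertical 3-window maxima over that intermediate table (3+3 comparisons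
--     per cell instead of 9)."""
--     n = len(grid)
--     horiz = [[max(row[j], row[j + 1], row[j + 2]) for j in range(n - 2)]
--              for row in grid]
--     return [[max(horiz[i][j], horiz[i + 1][j], horiz[i + 2][j])
--              for j in range(n - 2)]
--             for i in range(n - 2)]
-- ===== Notes on version B (the rewrite author's own statement) =====
-- stated objective: alternative
-- what changed: Replaces the single fused 9-way max per output cell by two passes exploiting separability: a row pass building an n x (n-2) table of horizontal 3-window maxima, then a column pass taking vertical 3-window maxima over that table (6 comparisons per cell instead of 9).
import Mathlib
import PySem

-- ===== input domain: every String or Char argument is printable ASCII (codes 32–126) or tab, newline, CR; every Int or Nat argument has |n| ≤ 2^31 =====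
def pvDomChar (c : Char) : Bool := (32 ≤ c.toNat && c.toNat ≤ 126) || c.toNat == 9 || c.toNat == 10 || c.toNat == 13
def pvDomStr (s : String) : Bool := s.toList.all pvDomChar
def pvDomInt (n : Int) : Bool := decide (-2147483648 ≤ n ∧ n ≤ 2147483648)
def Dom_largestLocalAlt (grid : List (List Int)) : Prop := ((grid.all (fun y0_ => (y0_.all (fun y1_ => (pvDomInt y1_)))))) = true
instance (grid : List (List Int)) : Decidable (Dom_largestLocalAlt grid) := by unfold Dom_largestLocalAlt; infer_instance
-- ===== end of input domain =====

-- B replaces the fused 9-way max per cell by a separable two-pass computation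
-- (horizontal 3-window maxima per row, then vertical 3-window maxima); objective: alternative.


-- ===== PORT A =====
-- A: for each (i, j) in range(n-2) × range(n-2), 9-way max over the 3×3 block.
-- grid[a][b] is ported as pyGetD (in range whenever Pre_ holds; Pre_ excludes the ragged grids
-- on which Python raises IndexError).
def largestLocalAlt (grid : List (List Int)) : List (List Int) :=
  let n : Int := grid.length
  (PySem.List.pyRange 0 (n - 2) 1).map (fun i =>
    (PySem.List.pyRange 0 (n - 2) 1).map (fun j =>
      max (PySem.List.pyGetD (PySem.List.pyGetD grid i []) j 0)
        (max (PySem.List.pyGetD (PySem.List.pyGetD grid i []) (j + 1) 0)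
          (max (PySem.List.pyGetD (PySem.List.pyGetD grid i []) (j + 2) 0)
            (max (PySem.List.pyGetD (PySem.List.pyGetD grid (i + 1) []) j 0)
              (max (PySem.List.pyGetD (PySem.List.pyGetD grid (i + 1) []) (j + 1) 0)
                (max (PySem.List.pyGetD (PySem.List.pyGetD grid (i + 1) []) (j + 2) 0)
                  (max (PySem.List.pyGetD (PySem.List.pyGetD grid (i + 2) []) j 0)
                    (max (PySem.List.pyGetD (PySem.List.pyGetD grid (i + 2) []) (j + 1) 0)
                      (PySem.List.pyGetD (PySem.List.pyGetD grid (i + 2) []) (j + 2) 0))))))))))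

-- ===== PORT B =====
-- B: first pass builds horiz (one row of horizontal 3-window maxima per grid row),
-- second pass takes vertical 3-window maxima over horiz.
def largestLocalAlt_alt (grid : List (List Int)) : List (List Int) :=
  let n : Int := grid.length
  let horiz : List (List Int) := grid.map (fun row =>
    (PySem.List.pyRange 0 (n - 2) 1).map (fun j =>
      max (PySem.List.pyGetD row j 0)
        (max (PySem.List.pyGetD row (j + 1) 0) (PySem.List.pyGetD row (j + 2) 0))))
  (PySem.List.pyRange 0 (n - 2) 1).map (fun i =>
    (PySem.List.pyRange 0 (n - 2) 1).map (fun j =>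
      max (PySem.List.pyGetD (PySem.List.pyGetD horiz i []) j 0)
        (max (PySem.List.pyGetD (PySem.List.pyGetD horiz (i + 1) []) j 0)
          (PySem.List.pyGetD (PySem.List.pyGetD horiz (i + 2) []) j 0))))

-- ===== PRECONDITION & SPEC =====
-- Pre_ excludes only the ragged grids on which Python A raises IndexError
-- (n ≥ 3 and some row shorter than n); both Pythons raise there.
def Pre_largestLocalAlt (grid : List (List Int)) : Prop :=
  grid.length < 3 ∨ ∀ row ∈ grid, grid.length ≤ row.length
instance (grid : List (List Int)) : Decidable (Pre_largestLocalAlt grid) := by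
  unfold Pre_largestLocalAlt; infer_instance
def pvWitness_largestLocalAlt : List (List Int) :=
  [[1, 2, 3], [4, 5, 6], [9, 8, 7]]
def Spec_largestLocalAlt (grid : List (List Int)) (out : List (List Int)) : Prop := out = largestLocalAlt_alt grid
instance (grid : List (List Int)) (out : List (List Int)) : Decidable (Spec_largestLocalAlt grid out) := by unfold Spec_largestLocalAlt; infer_instance

-- ===== CLAIM (what is proved, stated in full; the proofs are below) =====
def Claim_equal_largestLocalAlt : Prop := ∀ (grid : List (List Int)), Dom_largestLocalAlt grid → Pre_largestLocalAlt grid → Spec_largestLocalAlt grid (largestLocalAlt grid)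

-- ===== LEMMAS AND PROOFS =====

-- ===== VERDICT (by name: the statement is the Claim_ definition above) =====
theorem largestLocalAlt_spec : Claim_equal_largestLocalAlt := by
  intro grid _ _
  unfold Spec_largestLocalAlt largestLocalAlt largestLocalAlt_alt
  refine List.map_congr_left ?_
  intro i hi
  rw [PySem.List.mem_pyRange_one] at hi
  refine List.map_congr_left ?_
  intro j hj
  rw [PySem.List.mem_pyRange_one] at hj
  set F : List Int → List Int := fun row =>
    (PySem.List.pyRange 0 ((grid.length : Int) - 2) 1).map (fun j =>
      max (PySem.List.pyGetD row j 0)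
        (max (PySem.List.pyGetD row (j + 1) 0) (PySem.List.pyGetD row (j + 2) 0))) with hF
  rw [PySem.List.pyGetD_eq_getElem grid [] hi.1 (by omega),
      PySem.List.pyGetD_eq_getElem grid [] (show (0:Int) ≤ i + 1 by omega) (by omega),
      PySem.List.pyGetD_eq_getElem grid [] (show (0:Int) ≤ i + 2 by omega) (by omega),
      PySem.List.pyGetD_eq_getElem (grid.map F) [] hi.1 (by simp; omega),
      PySem.List.pyGetD_eq_getElem (grid.map F) [] (show (0:Int) ≤ i + 1 by omega) (by simp; omega),
      PySem.List.pyGetD_eq_getElem (grid.map F) [] (show (0:Int) ≤ i + 2 by omega) (by simp; omega)]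
  simp only [List.getElem_map, hF]
  rw [PySem.List.pyGetD_map_pyRange_of_nonneg _ _ _ _ hj.1 hj.2,
      PySem.List.pyGetD_map_pyRange_of_nonneg _ _ _ _ hj.1 hj.2,
      PySem.List.pyGetD_map_pyRange_of_nonneg _ _ _ _ hj.1 hj.2]
  ac_rfl
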